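-- pv_equiv track=rewrite | github.com/romiHill/reduplication_in_dm | parse_redup.py | add_vi_rule_redup
-- ===== SOURCE A (Python) =====
-- INITIAL_INDEX = 0
--
-- NODE_INDEX = 0
--
-- PHONOLOGICAL_MATERIAL_INDEX = -1
--
-- VOWEL_LST = ['a', 'e', 'i', 'o', 'u']
--
-- def is_vowel_initial(root):
--     if root[PHONOLOGICAL_MATERIAL_INDEX][INITIAL_INDEX] in VOWEL_LST:
--         return True
--     return False
--
-- def add_vi_rule_redup(data, vi_rules, scope, epenthesis, environment):
--     """
--     Add RED VI rule based on previously spelt out morphemes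
--     Phonological content is identified as being the final string that follows a new line
--     """
--     phonological_content = ''
--     first_node_to_copy = True
--     template_filled = False
--     for item in data:
--         # new line character means phonological output has been added to the structure
--         if '\n' in item:
--             item = item.split('\n')
--             if first_node_to_copy:
--                 node = item[NODE_INDEX]
--                 vowel_initial = is_vowel_initial(item)
--                 first_node_to_copy = False
--
--             if scope == 'bisyllabic':
--                 vowel_count = 0
--
--                 for char in item[PHONOLOGICAL_MATERIAL_INDEX]:
--                     if not template_filled:
--                         phonological_content += char
--                         if char in VOWEL_LST:
--                             vowel_count += 1
--                         if vowel_count >= 2: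
--                             template_filled = True
--                     else:
--                         break
--
--             else:
--                 phonological_content += item[PHONOLOGICAL_MATERIAL_INDEX]
--         if template_filled:
--             break
--
--
--     if epenthesis:
--         if environment == "VOWEL":
--             if vowel_initial and node == 'V':
--                 phonological_content += epenthesis
--         else:
--             phonological_content += epenthesis
--     vi_rules['RED'] = ['', phonological_content]
--
--     return vi_rules
-- ===== SOURCE B (Python) =====
-- VOWELS = {'a', 'e', 'i', 'o', 'u'}
--
--
-- def _bisyllabic_prefix(s):
--     """Prefix of s through its 2nd vowel, plus whether s holds >= 2 vowels."""
--     vowel_positions = [i for i, ch in enumerate(s) if ch in VOWELS]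
--     if len(vowel_positions) >= 2:
--         return s[:vowel_positions[1] + 1], True
--     return s, False
--
--
-- def add_vi_rule_redup(data, vi_rules, scope, epenthesis, environment):
--     # phonological material = last '\n'-separated field of each item holding '\n'
--     splits = [item.split('\n') for item in data if '\n' in item]
--     if splits:
--         node = splits[0][0]
--         vowel_initial = splits[0][-1][0] in VOWELS
--     if scope == 'bisyllabic':
--         parts = []
--         for sp in splits:
--             prefix, filled = _bisyllabic_prefix(sp[-1])
--             parts.append(prefix)
--             if filled:
--                 break
--         phonological_content = ''.join(parts)
--     else:
--         phonological_content = ''.join(sp[-1] for sp in splits)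
--     if epenthesis:
--         if environment == "VOWEL":
--             if vowel_initial and node == 'V':
--                 phonological_content += epenthesis
--         else:
--             phonological_content += epenthesis
--     vi_rules['RED'] = ['', phonological_content]
--     return vi_rules
-- ===== Notes on version B (the rewrite author's own statement) =====
-- stated objective: simpler
-- what changed: A's stateful single pass (first_node_to_copy/template_filled flags, char-by-char copy loop) is replaced by a filter/split pipeline: take the '\n'-carrying items, read node/vowel-initial off the first, and for the bisyllabic scope slice each item's material at the position of its 2nd vowel instead of copying characters under flags.
import Mathlib
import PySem

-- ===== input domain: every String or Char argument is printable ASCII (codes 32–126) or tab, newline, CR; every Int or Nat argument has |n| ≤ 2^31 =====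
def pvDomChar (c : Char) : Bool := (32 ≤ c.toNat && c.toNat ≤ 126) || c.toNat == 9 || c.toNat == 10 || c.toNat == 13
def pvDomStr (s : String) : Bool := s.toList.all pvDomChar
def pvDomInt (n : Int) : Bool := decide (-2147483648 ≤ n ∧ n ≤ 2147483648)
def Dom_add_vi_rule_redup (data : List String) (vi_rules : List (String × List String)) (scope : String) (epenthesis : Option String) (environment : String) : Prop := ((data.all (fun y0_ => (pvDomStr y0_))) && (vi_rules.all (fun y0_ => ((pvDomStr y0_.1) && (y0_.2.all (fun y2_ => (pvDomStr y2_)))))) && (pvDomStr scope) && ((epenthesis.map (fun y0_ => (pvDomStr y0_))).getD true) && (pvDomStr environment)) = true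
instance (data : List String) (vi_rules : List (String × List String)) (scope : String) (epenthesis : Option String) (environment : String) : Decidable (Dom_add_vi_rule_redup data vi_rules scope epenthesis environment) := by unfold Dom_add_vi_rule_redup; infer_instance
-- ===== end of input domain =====

-- B replaces A's stateful single pass (first/template_filled flags, char-by-char copy loop) by a
-- filter/split pipeline over the newline items plus a vowel-position slice (objective: simpler).
-- Both Pythons mutate vi_rules in place (vi_rules['RED'] = …); the equivalence proved here is about
-- the RETURNED dict, which both compute the same way.

def pvVowels : List Char := ['a', 'e', 'i', 'o', 'u']

-- item.split('\n'); sep ≠ "" so split? is never none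
def pvSplit (it : String) : List String := (PySem.Str.split? it "\n").getD []

-- item[PHONOLOGICAL_MATERIAL_INDEX] (= parts[-1]) as chars; parts is nonempty for split output
def pvMat (parts : List String) : List Char := ((PySem.List.pyGet? parts (-1)).getD "").toList

-- ===== PORT A =====
-- is_vowel_initial: root[-1][0] in VOWEL_LST; `none` = Python's IndexError (excluded by Pre_)
def pvIsVowelInitial (parts : List String) : Bool :=
  match (PySem.List.pyGet? parts (-1)).bind (fun s => PySem.Str.pyGet? s 0) with
  | some c => pvVowels.contains c
  | none => false

-- the inner `for char in item[-1]` loop: state (content, vowel_count, template_filled)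
def pvInnerA : List Char → List Char → Nat → Bool → List Char × Bool
  | [], content, _, filled => (content, filled)
  | ch :: rest, content, count, filled =>
    if filled then (content, filled)
    else
      let content := content ++ [ch]
      let count := if pvVowels.contains ch then count + 1 else count
      let filled := if 2 ≤ count then true else filled
      pvInnerA rest content count filled

-- the outer `for item in data` loop; `info = none` encodes first_node_to_copy = True
-- (node/vowel_initial not yet bound), `some (node, vowel_initial)` after the first newline item
def pvLoopA (scope : String) : List String → List Char → Option (String × Bool) → Bool → List Char × Option (String × Bool)
  | [], content, info, _ => (content, info)
  | it :: rest, content, info, filled =>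
    if PySem.Str.isIn "\n" it then
      let parts := pvSplit it
      let info := match info with
        | none => some ((PySem.List.pyGet? parts 0).getD "", pvIsVowelInitial parts)
        | some x => some x
      let res :=
        if scope = "bisyllabic" then pvInnerA (pvMat parts) content 0 filled
        else (content ++ pvMat parts, filled)
      if res.2 then (res.1, info) else pvLoopA scope rest res.1 info res.2
    else
      if filled then (content, info) else pvLoopA scope rest content info filled

def add_vi_rule_redup (data : List String) (vi_rules : List (String × List String)) (scope : String) (epenthesis : Option String) (environment : String) : List (String × List String) :=
  let res := pvLoopA scope data [] none false
  let content := res.1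
  let content :=
    match epenthesis with
    | none => content                     -- falsy
    | some ep =>
      if ep = "" then content             -- falsy
      else if environment = "VOWEL" then
        match res.2 with
        | some (node, vi) => if vi && node = "V" then content ++ ep.toList else content
        | none => content                 -- Python: UnboundLocalError (excluded by Pre_)
      else content ++ ep.toList
  ((PySem.Dict.mk vi_rules).insert "RED" ["", String.ofList content]).items

-- ===== PORT B =====
-- [i for i, ch in enumerate(s) if ch in VOWELS]  (zipIdx = enumerate with Nat indices)
def pvVowelPositions (s : List Char) : List Nat :=
  ((List.zipIdx s).filter (fun p => pvVowels.contains p.1)).map (fun p => p.2)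

-- prefix of s through its 2nd vowel; s[:i+1] with 0 ≤ i+1 is List.take (i+1) (exact)
def pvBisyllabicPrefix (s : List Char) : List Char × Bool :=
  match pvVowelPositions s with
  | _ :: p2 :: _ => (s.take (p2 + 1), true)
  | _ => (s, false)

-- the `parts` list built by B's bisyllabic loop (append prefix; stop once filled)
def pvContentBis : List (List String) → List (List Char)
  | [] => []
  | sp :: rest =>
    let pf := pvBisyllabicPrefix (pvMat sp)
    if pf.2 then [pf.1] else pf.1 :: pvContentBis rest

def add_vi_rule_redup_alt (data : List String) (vi_rules : List (String × List String)) (scope : String) (epenthesis : Option String) (environment : String) : List (String × List String) :=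
  let splits := (data.filter (fun it => PySem.Str.isIn "\n" it)).map pvSplit
  let info : Option (String × Bool) :=
    match splits with
    | [] => none                          -- node / vowel_initial stay unbound
    | sp :: _ => some ((PySem.List.pyGet? sp 0).getD "",
        pvVowels.contains ((PySem.Str.pyGet? ((PySem.List.pyGet? sp (-1)).getD "") 0).getD ' '))
  let content :=
    if scope = "bisyllabic" then (pvContentBis splits).flatten
    else (splits.map pvMat).flatten       -- ''.join(sp[-1] for sp in splits)
  let content :=
    match epenthesis with
    | none => content
    | some ep =>
      if ep = "" then content
      else if environment = "VOWEL" then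
        match info with
        | some (node, vi) => if vi && node = "V" then content ++ ep.toList else content
        | none => content                 -- Python: UnboundLocalError (excluded by Pre_)
      else content ++ ep.toList
  ((PySem.Dict.mk vi_rules).insert "RED" ["", String.ofList content]).items

-- ===== PRECONDITION & SPEC =====
-- Pre_ excludes exactly the inputs where the Python A raises: (a) the first newline-carrying item's
-- last '\n'-field is empty (IndexError in is_vowel_initial), (b) no item contains '\n' while
-- epenthesis is truthy and environment == "VOWEL" (UnboundLocalError on vowel_initial).
def pvPreCheck (data : List String) (epenthesis : Option String) (environment : String) : Bool :=
  match data.find? (fun it => PySem.Str.isIn "\n" it) with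
  | some it => ((PySem.Str.split? it "\n").getD []).getLastD "" != ""
  | none => !((match epenthesis with | some e => e != "" | none => false) && environment == "VOWEL")

def Pre_add_vi_rule_redup (data : List String) (vi_rules : List (String × List String)) (scope : String) (epenthesis : Option String) (environment : String) : Prop :=
  pvPreCheck data epenthesis environment = true
instance (data : List String) (vi_rules : List (String × List String)) (scope : String) (epenthesis : Option String) (environment : String) : Decidable (Pre_add_vi_rule_redup data vi_rules scope epenthesis environment) := by unfold Pre_add_vi_rule_redup; infer_instance

def pvWitness_add_vi_rule_redup : List String × (List (String × List String)) × String × Option String × String :=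
  (["ta\npa"], [("X", ["y"])], "bisyllabic", some "t", "VOWEL")

def Spec_add_vi_rule_redup (data : List String) (vi_rules : List (String × List String)) (scope : String) (epenthesis : Option String) (environment : String) (out : List (String × List String)) : Prop := out = add_vi_rule_redup_alt data vi_rules scope epenthesis environment
instance (data : List String) (vi_rules : List (String × List String)) (scope : String) (epenthesis : Option String) (environment : String) (out : List (String × List String)) : Decidable (Spec_add_vi_rule_redup data vi_rules scope epenthesis environment out) := by unfold Spec_add_vi_rule_redup; infer_instance

-- ===== CLAIM (what is proved, stated in full; the proofs are below) =====
def Claim_equal_add_vi_rule_redup : Prop := ∀ (data : List String) (vi_rules : List (String × List String)) (scope : String) (epenthesis : Option String) (environment : String), Dom_add_vi_rule_redup data vi_rules scope epenthesis environment → Pre_add_vi_rule_redup data vi_rules scope epenthesis environment → Spec_add_vi_rule_redup data vi_rules scope epenthesis environment (add_vi_rule_redup data vi_rules scope epenthesis environment)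

-- ===== LEMMAS AND PROOFS =====

theorem pvWitness_ok :
    Dom_add_vi_rule_redup (pvWitness_add_vi_rule_redup.1) (pvWitness_add_vi_rule_redup.2.1) (pvWitness_add_vi_rule_redup.2.2.1) (pvWitness_add_vi_rule_redup.2.2.2.1) (pvWitness_add_vi_rule_redup.2.2.2.2) ∧
    Pre_add_vi_rule_redup (pvWitness_add_vi_rule_redup.1) (pvWitness_add_vi_rule_redup.2.1) (pvWitness_add_vi_rule_redup.2.2.1) (pvWitness_add_vi_rule_redup.2.2.2.1) (pvWitness_add_vi_rule_redup.2.2.2.2) := by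
  constructor <;> decide

-- once filled, pvInnerA is the identity
theorem pvInnerA_filled (s : List Char) (c : List Char) (n : Nat) :
    pvInnerA s c n true = (c, true) := by
  cases s <;> simp [pvInnerA]

-- vowel positions of a cons
theorem pvVowelPositions_cons (ch : Char) (r : List Char) :
    pvVowelPositions (ch :: r) =
      if pvVowels.contains ch then 0 :: (pvVowelPositions r).map (· + 1)
      else (pvVowelPositions r).map (· + 1) := by
  unfold pvVowelPositions
  rw [List.zipIdx_cons, List.zipIdx_succ]
  by_cases hv : ch ∈ pvVowels <;>
    simp [hv, List.filter_cons] <;>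
    (rw [List.filter_map]; simp [List.map_map, Function.comp_def])

-- the per-item prefix recursion, count already at n
def pvPfx : List Char → Nat → List Char × Bool
  | [], _ => ([], false)
  | ch :: r, n =>
    let n' := if pvVowels.contains ch then n + 1 else n
    if 2 ≤ n' then ([ch], true)
    else
      let q := pvPfx r n'
      (ch :: q.1, q.2)

theorem pvInnerA_eq_pfx (s : List Char) : ∀ (c : List Char) (n : Nat),
    pvInnerA s c n false = (c ++ (pvPfx s n).1, (pvPfx s n).2) := by
  induction s with
  | nil => intro c n; simp [pvInnerA, pvPfx]
  | cons ch r ih =>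
    intro c n
    by_cases hv : ch ∈ pvVowels <;>
      simp only [pvInnerA, pvPfx, List.contains_eq_mem, hv, decide_true, decide_false,
        if_true, if_false, Bool.false_eq_true] <;>
      split <;>
      simp_all [pvInnerA_filled, List.append_assoc]

theorem pvPfx_one (s : List Char) :
    pvPfx s 1 = (match pvVowelPositions s with
      | p :: _ => (s.take (p + 1), true)
      | [] => (s, false)) := by
  induction s with
  | nil => simp [pvPfx, pvVowelPositions]
  | cons ch r ih =>
    rw [pvVowelPositions_cons]
    by_cases hv : ch ∈ pvVowels
    · simp [pvPfx, hv]
    · simp only [pvPfx, List.contains_eq_mem, hv, decide_false, Bool.false_eq_true, if_false,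
        if_neg (by omega : ¬ 2 ≤ 1)]
      rw [ih]
      cases h : pvVowelPositions r <;> simp [h, List.take_succ_cons]

theorem pvPfx_zero (s : List Char) :
    pvPfx s 0 = pvBisyllabicPrefix s := by
  induction s with
  | nil => simp [pvPfx, pvBisyllabicPrefix, pvVowelPositions]
  | cons ch r ih =>
    unfold pvBisyllabicPrefix
    rw [pvVowelPositions_cons]
    by_cases hv : ch ∈ pvVowels
    · simp only [pvPfx, List.contains_eq_mem, hv, decide_true, if_true,
        if_neg (by omega : ¬ 2 ≤ 0 + 1)]
      rw [pvPfx_one]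
      cases h : pvVowelPositions r <;> simp [h, List.take_succ_cons]
    · simp only [pvPfx, List.contains_eq_mem, hv, decide_false, Bool.false_eq_true, if_false,
        if_neg (by omega : ¬ 2 ≤ 0)]
      rw [ih]
      unfold pvBisyllabicPrefix
      cases h : pvVowelPositions r with
      | nil => simp [h]
      | cons p t => cases t <;> simp [h, List.take_succ_cons]

theorem pvInnerA_eq (s : List Char) (c : List Char) :
    pvInnerA s c 0 false = (c ++ (pvBisyllabicPrefix s).1, (pvBisyllabicPrefix s).2) := by
  rw [pvInnerA_eq_pfx, pvPfx_zero]

-- B's inline vowel_initial expression equals A's is_vowel_initial helper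
theorem pvVowelInitial_eq (parts : List String) :
    pvVowels.contains ((PySem.Str.pyGet? ((PySem.List.pyGet? parts (-1)).getD "") 0).getD ' ')
      = pvIsVowelInitial parts := by
  unfold pvIsVowelInitial
  cases h : PySem.List.pyGet? parts (-1) with
  | none => simp [h]; decide
  | some s =>
    simp only [h, Option.getD_some, Option.bind_some]
    cases h2 : PySem.Str.pyGet? s 0 with
    | none => simp [h2]; decide
    | some c => simp [h2]

-- B's info from the filtered-splits pipeline
def pvInfoB (splits : List (List String)) : Option (String × Bool) :=
  match splits with
  | [] => none
  | sp :: _ => some ((PySem.List.pyGet? sp 0).getD "", pvIsVowelInitial sp)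

def pvContentB (scope : String) (splits : List (List String)) : List Char :=
  if scope = "bisyllabic" then (pvContentBis splits).flatten else (splits.map pvMat).flatten

theorem pvFilterPred : (fun it => PySem.Str.isIn "\n" it) = (fun it : String => PySem.Chars.isIn ['\n'] it.toList) :=
  funext fun s => by simp [PySem.Str.isIn]

-- the main loop/pipeline correspondence (template_filled = false at every loop entry)
theorem pvLoopA_eq (scope : String) (data : List String) : ∀ (c : List Char) (info : Option (String × Bool)),
    pvLoopA scope data c info false =
      (let splits := (data.filter (fun it => PySem.Str.isIn "\n" it)).map pvSplit
       (c ++ pvContentB scope splits,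
        match info with | some x => some x | none => pvInfoB splits)) := by
  induction data with
  | nil => intro c info; cases info <;> simp [pvLoopA, pvContentB, pvContentBis, pvInfoB]
  | cons it rest ih =>
    intro c info
    by_cases hnl : PySem.Str.isIn "\n" it
    · simp only [pvLoopA, hnl, if_true, List.filter_cons_of_pos hnl, List.map_cons]
      by_cases hsc : scope = "bisyllabic"
      · subst hsc
        simp only [if_true, pvInnerA_eq]
        cases hf : (pvBisyllabicPrefix (pvMat (pvSplit it))).2 <;>
          cases info <;>
            simp [ih, pvContentB, pvContentBis, pvInfoB, hf, List.append_assoc,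
              List.map_map, Function.comp_def, pvFilterPred]
      · simp only [hsc, if_false, Bool.false_eq_true]
        cases info <;>
          simp [ih, pvContentB, pvContentBis, pvInfoB, hsc, List.append_assoc,
            List.map_map, Function.comp_def, pvFilterPred]
    · simp only [pvLoopA, hnl, if_false, Bool.false_eq_true,
        List.filter_cons_of_neg (by simpa using hnl)]
      rw [List.filter_cons_of_neg (by simpa using hnl)]
      exact ih c info

-- ===== VERDICT (by name: the statement is the Claim_ definition above) =====
theorem add_vi_rule_redup_spec : Claim_equal_add_vi_rule_redup := by
  intro data vi_rules scope epenthesis environment _ _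
  unfold Spec_add_vi_rule_redup add_vi_rule_redup add_vi_rule_redup_alt
  rw [pvLoopA_eq]
  simp only [pvVowelInitial_eq]
  rfl
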